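-- pv_equiv track=rewrite | github.com/gsoaresbaptista/course-forge | src/course_forge/infrastructure/templates/jinja_html_template_renderer.py | _is_slug_in_config
-- ===== SOURCE A (Python) =====
-- def _is_slug_in_config(slug: str, original_name: str, allowed_items: list[str]) -> bool:
--     """Check if a slug matches any of the allowed config items."""
--     for item in allowed_items:
--         if (
--             slug == item
--             or slug.startswith(item + "-")
--             or original_name == item
--             or original_name.startswith(item + " ")
--             or original_name.startswith(item + "-")
--         ):
--             return True
--     return False
-- ===== SOURCE B (Python) =====
-- def _is_slug_in_config(slug: str, original_name: str, allowed_items: list[str]) -> bool: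
--     """Check membership by probing a set with every delimiter-cut prefix."""
--     allowed = set(allowed_items)
--     if slug in allowed or original_name in allowed:
--         return True
--     for k, ch in enumerate(slug):
--         if ch == "-" and slug[:k] in allowed:
--             return True
--     for k, ch in enumerate(original_name):
--         if (ch == " " or ch == "-") and original_name[:k] in allowed:
--             return True
--     return False
-- ===== Notes on version B (the rewrite author's own statement) =====
-- stated objective: faster
-- what changed: Instead of scanning allowed_items and testing slug/original_name with startswith per item, B builds a set of allowed_items once and probes it with the full strings plus every delimiter-cut prefix (slug[:k] at '-' positions, original_name[:k] at ' '/'-' positions).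
import Mathlib
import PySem

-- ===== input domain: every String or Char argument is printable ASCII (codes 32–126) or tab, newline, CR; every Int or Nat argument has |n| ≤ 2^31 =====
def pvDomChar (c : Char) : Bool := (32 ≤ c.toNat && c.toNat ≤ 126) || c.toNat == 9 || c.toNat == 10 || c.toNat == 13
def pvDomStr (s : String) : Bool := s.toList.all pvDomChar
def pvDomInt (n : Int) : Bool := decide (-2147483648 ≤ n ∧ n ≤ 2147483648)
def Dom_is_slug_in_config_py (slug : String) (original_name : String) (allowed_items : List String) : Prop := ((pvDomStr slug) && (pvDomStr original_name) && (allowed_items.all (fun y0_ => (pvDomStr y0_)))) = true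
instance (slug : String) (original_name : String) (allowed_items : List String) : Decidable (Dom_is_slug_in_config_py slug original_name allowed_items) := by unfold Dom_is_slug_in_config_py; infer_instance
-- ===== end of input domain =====

-- B replaces the per-item startswith scan by one set of allowed_items probed with every delimiter-cut prefix (alternative decomposition, same result).

-- ===== PORT A =====
-- for item in allowed_items: if slug == item or slug.startswith(item+"-") or ... : return True; return False
def is_slug_in_config_py (slug : String) (original_name : String) (allowed_items : List String) : Bool :=
  allowed_items.any (fun item =>
    slug == item
    || PySem.Str.startswith slug (item ++ "-")
    || original_name == item
    || PySem.Str.startswith original_name (item ++ " ")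
    || PySem.Str.startswith original_name (item ++ "-"))

-- ===== PORT B =====
def is_slug_in_config_py_alt (slug : String) (original_name : String) (allowed_items : List String) : Bool :=
  let allowed : PySem.Set String := PySem.Set.ofList allowed_items
  if PySem.Set.contains allowed slug || PySem.Set.contains allowed original_name then
    true
  else if (PySem.List.enumerate slug.toList).any (fun p =>
      p.2 == '-' && PySem.Set.contains allowed (PySem.Str.slice slug none (some p.1))) then
    true
  else
    (PySem.List.enumerate original_name.toList).any (fun p =>
      (p.2 == ' ' || p.2 == '-') && PySem.Set.contains allowed (PySem.Str.slice original_name none (some p.1)))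

-- ===== PRECONDITION & SPEC =====
def Spec_is_slug_in_config_py (slug : String) (original_name : String) (allowed_items : List String) (out : Bool) : Prop := out = is_slug_in_config_py_alt slug original_name allowed_items
instance (slug : String) (original_name : String) (allowed_items : List String) (out : Bool) : Decidable (Spec_is_slug_in_config_py slug original_name allowed_items out) := by unfold Spec_is_slug_in_config_py; infer_instance

-- ===== CLAIM (what is proved, stated in full; the proofs are below) =====
def Claim_equal_is_slug_in_config_py : Prop := ∀ (slug : String) (original_name : String) (allowed_items : List String), Dom_is_slug_in_config_py slug original_name allowed_items → Spec_is_slug_in_config_py slug original_name allowed_items (is_slug_in_config_py slug original_name allowed_items)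

-- ===== LEMMAS AND PROOFS =====

-- (item ++ [c]) is a prefix of cs iff cs has c at some position k with item = cs.take k
theorem pv_snoc_prefix_iff {item cs : List Char} {c : Char} :
    (item ++ [c]) <+: cs ↔ ∃ k, ∃ h : k < cs.length, cs[k] = c ∧ item = cs.take k := by
  constructor
  · rintro ⟨t, ht⟩
    refine ⟨item.length, ?_, ?_, ?_⟩ <;> subst ht <;> simp
  · rintro ⟨k, hk, hc, rfl⟩
    refine ⟨cs.drop (k+1), ?_⟩
    have h1 : cs[k] :: cs.drop (k+1) = cs.drop k := List.getElem_cons_drop hk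
    rw [List.append_assoc]
    show cs.take k ++ (c :: cs.drop (k+1)) = cs
    rw [← hc, h1, List.take_append_drop]

-- A's per-item test, characterised
theorem pv_match_iff (slug original_name item : String) :
    (slug == item
      || PySem.Str.startswith slug (item ++ "-")
      || original_name == item
      || PySem.Str.startswith original_name (item ++ " ")
      || PySem.Str.startswith original_name (item ++ "-")) = true
    ↔ (item = slug ∨ item = original_name
       ∨ (∃ k, ∃ h : k < slug.toList.length, slug.toList[k] = '-' ∧ item.toList = slug.toList.take k)
       ∨ (∃ k, ∃ h : k < original_name.toList.length,
            (original_name.toList[k] = ' ' ∨ original_name.toList[k] = '-')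
            ∧ item.toList = original_name.toList.take k)) := by
  have htl : ∀ s : String, (item ++ s).toList = item.toList ++ s.toList := by
    intro s; simp
  simp only [Bool.or_eq_true, beq_iff_eq, PySem.Str.startswith_eq,
    PySem.Chars.startswith_iff, htl]
  constructor
  · rintro ((((h | h) | h) | h) | h)
    · exact Or.inl h.symm
    · obtain ⟨k, hk, hc, he⟩ := pv_snoc_prefix_iff.mp (by simpa using h)
      exact Or.inr (Or.inr (Or.inl ⟨k, hk, hc, he⟩))
    · exact Or.inr (Or.inl h.symm)
    · obtain ⟨k, hk, hc, he⟩ := pv_snoc_prefix_iff.mp (by simpa using h)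
      exact Or.inr (Or.inr (Or.inr ⟨k, hk, Or.inl hc, he⟩))
    · obtain ⟨k, hk, hc, he⟩ := pv_snoc_prefix_iff.mp (by simpa using h)
      exact Or.inr (Or.inr (Or.inr ⟨k, hk, Or.inr hc, he⟩))
  · rintro (h | h | ⟨k, hk, hc, he⟩ | ⟨k, hk, hc, he⟩)
    · exact Or.inl (Or.inl (Or.inl (Or.inl h.symm)))
    · exact Or.inl (Or.inl (Or.inr h.symm))
    · exact Or.inl (Or.inl (Or.inl (Or.inr (by simpa using pv_snoc_prefix_iff.mpr ⟨k, hk, hc, he⟩))))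
    · rcases hc with hc | hc
      · exact Or.inl (Or.inr (by simpa using pv_snoc_prefix_iff.mpr ⟨k, hk, hc, he⟩))
      · exact Or.inr (by simpa using pv_snoc_prefix_iff.mpr ⟨k, hk, hc, he⟩)

-- B's enumerate loop, characterised
theorem pv_loop_iff (s : String) (allowed_items : List String) (P : Char → Prop)
    [DecidablePred P] (pb : Char → Bool) (hp : ∀ c, pb c = true ↔ P c) :
    ((PySem.List.enumerate s.toList).any (fun p =>
        pb p.2 && PySem.Set.contains (PySem.Set.ofList allowed_items)
          (PySem.Str.slice s none (some p.1))) = true)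
    ↔ (∃ item ∈ allowed_items, ∃ k, ∃ h : k < s.toList.length,
        P s.toList[k] ∧ item.toList = s.toList.take k) := by
  have hsl : ∀ k : Nat, (PySem.Str.slice s none (some ((0:Int) + k))).toList = s.toList.take k := by
    intro k
    have : (0:Int) + (k:Int) = ((k:Nat):Int) := by omega
    simp [this, PySem.Str.toList_slice, PySem.List.slice_to_natCast]
  rw [List.any_eq_true]
  constructor
  · rintro ⟨p, hmem, hp2⟩
    obtain ⟨k, hk, rfl⟩ := (PySem.List.mem_enumerate_iff _ _ _).mp hmem
    simp only [Bool.and_eq_true, hp] at hp2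
    obtain ⟨hP, hcont⟩ := hp2
    have hmem' := (PySem.Set.contains_iff _ _).mp hcont
    rw [PySem.Set.mem_ofList] at hmem'
    refine ⟨_, hmem', k, hk, hP, ?_⟩
    rw [hsl k]
  · rintro ⟨item, hitem, k, hk, hP, he⟩
    refine ⟨((0:Int) + k, s.toList[k]), (PySem.List.mem_enumerate_iff _ _ _).mpr ⟨k, hk, rfl⟩, ?_⟩
    simp only [Bool.and_eq_true, hp]
    refine ⟨hP, ?_⟩
    rw [PySem.Set.contains_iff, PySem.Set.mem_ofList]
    have : PySem.Str.slice s none (some ((0:Int) + k)) = item := by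
      apply String.ext
      rw [hsl k, he]
    rwa [this]

-- B, characterised
theorem pv_alt_iff (slug original_name : String) (allowed_items : List String) :
    is_slug_in_config_py_alt slug original_name allowed_items = true
    ↔ ((slug ∈ allowed_items ∨ original_name ∈ allowed_items)
       ∨ (∃ item ∈ allowed_items, ∃ k, ∃ h : k < slug.toList.length,
            slug.toList[k] = '-' ∧ item.toList = slug.toList.take k)
       ∨ (∃ item ∈ allowed_items, ∃ k, ∃ h : k < original_name.toList.length,
            (original_name.toList[k] = ' ' ∨ original_name.toList[k] = '-')
            ∧ item.toList = original_name.toList.take k)) := by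
  have hMem : ∀ x : String,
      PySem.Set.contains (PySem.Set.ofList allowed_items) x = true ↔ x ∈ allowed_items := by
    intro x; rw [PySem.Set.contains_iff, PySem.Set.mem_ofList]
  have hL1 := pv_loop_iff slug allowed_items (fun c => c = '-') (fun c => c == '-')
    (by intro c; simp)
  have hL2 := pv_loop_iff original_name allowed_items (fun c => c = ' ' ∨ c = '-')
    (fun c => c == ' ' || c == '-') (by intro c; simp)
  show (if _ then _ else if _ then _ else _) = true ↔ _
  split_ifs with h1 h2
  · simp only [true_iff]
    rcases Bool.or_eq_true _ _ |>.mp h1 with h | h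
    · exact Or.inl (Or.inl ((hMem slug).mp h))
    · exact Or.inl (Or.inr ((hMem original_name).mp h))
  · simp only [true_iff]
    exact Or.inr (Or.inl (hL1.mp h2))
  · rw [hL2]
    constructor
    · exact fun h => Or.inr (Or.inr h)
    · rintro ((h | h) | h | h)
      · have hn : slug ∉ allowed_items ∧ original_name ∉ allowed_items := by simpa using h1
        exact absurd h hn.1
      · have hn : slug ∉ allowed_items ∧ original_name ∉ allowed_items := by simpa using h1
        exact absurd h hn.2
      · exact absurd (hL1.mpr h) (by simpa using h2)
      · exact h

-- ===== VERDICT (by name: the statement is the Claim_ definition above) =====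
theorem is_slug_in_config_py_spec : Claim_equal_is_slug_in_config_py := by
  intro slug original_name allowed_items _
  unfold Spec_is_slug_in_config_py
  rw [Bool.eq_iff_iff]
  rw [pv_alt_iff]
  unfold is_slug_in_config_py
  rw [List.any_eq_true]
  constructor
  · rintro ⟨item, hitem, hm⟩
    rcases (pv_match_iff slug original_name item).mp hm with rfl | rfl | h | h
    · exact Or.inl (Or.inl hitem)
    · exact Or.inl (Or.inr hitem)
    · exact Or.inr (Or.inl ⟨item, hitem, h⟩)
    · exact Or.inr (Or.inr ⟨item, hitem, h⟩)
  · rintro ((h | h) | ⟨item, hitem, h⟩ | ⟨item, hitem, h⟩)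
    · exact ⟨slug, h, (pv_match_iff _ _ _).mpr (Or.inl rfl)⟩
    · exact ⟨original_name, h, (pv_match_iff _ _ _).mpr (Or.inr (Or.inl rfl))⟩
    · exact ⟨item, hitem, (pv_match_iff _ _ _).mpr (Or.inr (Or.inr (Or.inl h)))⟩
    · exact ⟨item, hitem, (pv_match_iff _ _ _).mpr (Or.inr (Or.inr (Or.inr h)))⟩
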